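-- pv_equiv track=rewrite | github.com/aseppa20/advent_of_code_2022 | Day 8/grid.py | scanToInstertMinusOneUpToDown
-- ===== SOURCE A (Python) =====
-- def scanToInstertMinusOneUpToDown(matrix) -> list:
--     columnLen = len(matrix)
--
--     for col in range( len(matrix[0]) ):
--         currentMax = -1
--         for index in range(columnLen):
--             if matrix[index][col] > currentMax:
--                 currentMax = matrix[index][col]
--             else:
--                 matrix[index][col] = -1
--
--     return matrix
-- ===== SOURCE B (Python) =====
-- def scanToInstertMinusOneUpToDown(matrix) -> list:
--     # Two staged passes: first decide, purely from the original values, which cells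
--     # to blank (a cell is blanked iff it does not exceed the max of the original
--     # cells above it in its column, computed by brute force per cell, no running
--     # accumulator); then mutate those positions in place.
--     width = len(matrix[0])
--     blank = [(i, c)
--              for i in range(len(matrix))
--              for c in range(width)
--              if matrix[i][c] <= max([matrix[j][c] for j in range(i)] + [-1])]
--     for i, c in blank:
--         matrix[i][c] = -1
--     return matrix
-- ===== Notes on version B (the rewrite author's own statement) =====
-- stated objective: alternative
-- what changed: A's stateful column-major scan with a running maximum is replaced by a stateless two-stage method: first a per-cell brute-force test (each cell compared against the max of the original cells above it, recomputed from scratch) collects the positions to blank, then a second pass writes -1 at those positions.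
import Mathlib
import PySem

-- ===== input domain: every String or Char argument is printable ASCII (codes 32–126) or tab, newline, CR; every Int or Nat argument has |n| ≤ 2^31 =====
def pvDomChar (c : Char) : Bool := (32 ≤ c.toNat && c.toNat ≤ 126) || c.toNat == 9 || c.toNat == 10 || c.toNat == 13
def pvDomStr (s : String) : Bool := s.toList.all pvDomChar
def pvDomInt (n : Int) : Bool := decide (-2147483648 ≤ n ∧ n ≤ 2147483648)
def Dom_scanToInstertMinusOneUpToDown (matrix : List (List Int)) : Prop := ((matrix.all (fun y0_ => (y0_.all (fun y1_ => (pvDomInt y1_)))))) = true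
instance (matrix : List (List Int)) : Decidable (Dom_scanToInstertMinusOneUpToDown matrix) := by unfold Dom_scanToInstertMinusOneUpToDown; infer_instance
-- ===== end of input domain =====

-- B replaces A's stateful running-max column scan by a stateless two-stage method: first a brute-force
-- per-cell test against the max of the original cells above collects the positions to blank, then a
-- second pass writes -1 there; equal return value, same in-place mutation of the argument in Python.

-- ===== PORT A =====
-- literal port of A: outer loop over columns of range(len(matrix[0])), inner loop over row
-- indices with state (matrix, currentMax); reads/writes via PySem indexing primitives.
def scanToInstertMinusOneUpToDown (matrix : List (List Int)) : List (List Int) :=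
  let columnLen : Int := (matrix.length : Int)
  (PySem.List.pyRange 0 ((PySem.List.pyGetD matrix 0 []).length : Int) 1).foldl
    (fun m col =>
      ((PySem.List.pyRange 0 columnLen 1).foldl
          (fun (st : List (List Int) × Int) index =>
            if PySem.List.pyGetD (PySem.List.pyGetD st.1 index []) col 0 > st.2 then
              (st.1, PySem.List.pyGetD (PySem.List.pyGetD st.1 index []) col 0)
            else
              (PySem.List.pySetD st.1 index
                 (PySem.List.pySetD (PySem.List.pyGetD st.1 index []) col (-1)), st.2))
          (m, -1)).1)
    matrix

-- ===== PORT B =====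
-- literal port of B: blank = [(i,c) for i … for c … if matrix[i][c] <= max([matrix[j][c] for j in range(i)] + [-1])],
-- then for (i,c) in blank: matrix[i][c] = -1.  Python's max(nonempty list) → PySem.List.max? (identity key).
def scanToInstertMinusOneUpToDown_alt (matrix : List (List Int)) : List (List Int) :=
  let width : Int := ((PySem.List.pyGetD matrix 0 []).length : Int)
  let blank : List (Int × Int) :=
    (PySem.List.pyRange 0 (matrix.length : Int) 1).flatMap (fun i =>
      (PySem.List.pyRange 0 width 1).filterMap (fun c =>
        if PySem.List.pyGetD (PySem.List.pyGetD matrix i []) c 0 ≤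
            (PySem.List.max?
              (((PySem.List.pyRange 0 i 1).map
                  (fun j => PySem.List.pyGetD (PySem.List.pyGetD matrix j []) c 0)) ++ [-1])
              (fun y => y)).getD 0
        then some (i, c) else none))
  blank.foldl
    (fun m p =>
      PySem.List.pySetD m p.1 (PySem.List.pySetD (PySem.List.pyGetD m p.1 []) p.2 (-1)))
    matrix

-- ===== PRECONDITION & SPEC =====
-- Pre_ excludes exactly the inputs where Python A raises: the empty matrix (matrix[0] → IndexError)
-- and matrices with a row shorter than row 0 (matrix[index][col] → IndexError); Python B raises there too.
def Pre_scanToInstertMinusOneUpToDown (matrix : List (List Int)) : Prop :=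
  matrix ≠ [] ∧ ∀ row ∈ matrix, (matrix.headD []).length ≤ row.length
instance (matrix : List (List Int)) : Decidable (Pre_scanToInstertMinusOneUpToDown matrix) := by
  unfold Pre_scanToInstertMinusOneUpToDown; infer_instance
def pvWitness_scanToInstertMinusOneUpToDown : List (List Int) := [[3, 0, 3], [2, 5, 5], [6, 5, 3]]

def Spec_scanToInstertMinusOneUpToDown (matrix : List (List Int)) (out : List (List Int)) : Prop := out = scanToInstertMinusOneUpToDown_alt matrix
instance (matrix : List (List Int)) (out : List (List Int)) : Decidable (Spec_scanToInstertMinusOneUpToDown matrix out) := by unfold Spec_scanToInstertMinusOneUpToDown; infer_instance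

-- ===== CLAIM (what is proved, stated in full; the proofs are below) =====
def Claim_equal_scanToInstertMinusOneUpToDown : Prop := ∀ (matrix : List (List Int)), Dom_scanToInstertMinusOneUpToDown matrix → Pre_scanToInstertMinusOneUpToDown matrix → Spec_scanToInstertMinusOneUpToDown matrix (scanToInstertMinusOneUpToDown matrix)

-- ===== LEMMAS AND PROOFS =====

def pvVal (row : List Int) (c : Nat) : Int := row.getD c 0
def pvStepMax (a v : Int) : Int := if v > a then v else a
def pvPM (rows : List (List Int)) (c : Nat) : Int := (rows.map (fun r => pvVal r c)).foldl pvStepMax (-1)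
def pvRowT (w : Nat) (p : Nat → Int) (row : List Int) : List Int :=
  (List.range w).foldl (fun r c => if pvVal row c > p c then r else r.set c (-1)) row

theorem pvVal_set_ne (row : List Int) (j : Nat) (v : Int) (c : Nat) (h : j ≠ c) :
    pvVal (row.set j v) c = pvVal row c := by
  simp [pvVal, List.getD_eq_getElem?_getD, List.getElem?_set_ne h]

-- mapIdx toolkit
theorem pvMapIdx_congr {α β : Type} (l : List α) (f g : Nat → α → β)
    (h : ∀ i (hi : i < l.length), f i l[i] = g i l[i]) : l.mapIdx f = l.mapIdx g := by
  apply List.ext_getElem (by simp)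
  intro i h1 h2
  simp only [List.getElem_mapIdx]
  exact h i (by simpa using h1)

theorem pvMapIdx_id {α : Type} (l : List α) : l.mapIdx (fun _ r => r) = l := by
  apply List.ext_getElem (by simp)
  intro i h1 h2
  simp [List.getElem_mapIdx]

theorem pvTake_mapIdx {α β : Type} (l : List α) (f : Nat → α → β) (n : Nat) :
    (l.mapIdx f).take n = (l.take n).mapIdx f := by
  apply List.ext_getElem (by simp)
  intro i h1 h2
  simp [List.getElem_mapIdx, List.getElem_take]

theorem pvMap_mapIdx {α β γ : Type} (l : List α) (f : Nat → α → β) (g : β → γ) :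
    (l.mapIdx f).map g = l.mapIdx (fun i a => g (f i a)) := by
  apply List.ext_getElem (by simp)
  intro i h1 h2
  simp [List.getElem_mapIdx]

theorem pvMapIdx_eq_map {α β : Type} (l : List α) (g : α → β) :
    l.mapIdx (fun _ a => g a) = l.map g := by
  apply List.ext_getElem (by simp)
  intro i h1 h2
  simp [List.getElem_mapIdx]

theorem pvSet_mapIdx {α : Type} (l : List α) (f : Nat → α → α) (n : Nat) (x : α) :
    (l.mapIdx f).set n x = l.mapIdx (fun i a => if i = n then x else f i a) := by
  apply List.ext_getElem (by simp)
  intro i h1 h2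
  simp only [List.getElem_set, List.getElem_mapIdx]
  rcases eq_or_ne i n with h | h
  · simp [h]
  · simp [h, Ne.symm h]

theorem pvGetD_mapIdx {α : Type} (l : List α) (f : Nat → α → α) (n : Nat) (d : α) (h : n < l.length) :
    (l.mapIdx f).getD n d = f n l[n] := by
  simp [List.getD_eq_getElem?_getD, h, List.getElem_mapIdx]

theorem pvMapIdx_mapIdx {α β γ : Type} (l : List α) (f : Nat → α → β) (g : Nat → β → γ) :
    (l.mapIdx f).mapIdx g = l.mapIdx (fun i a => g i (f i a)) := by
  apply List.ext_getElem (by simp)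
  intro i h1 h2
  simp [List.getElem_mapIdx]

-- pvRowT lemmas
theorem pvRowT_succ (w : Nat) (p : Nat → Int) (row : List Int) :
    pvRowT (w+1) p row = if pvVal row w > p w then pvRowT w p row else (pvRowT w p row).set w (-1) := by
  simp [pvRowT, List.range_succ]

theorem pvRowT_val_of_le (w : Nat) (p : Nat → Int) (row : List Int) (c : Nat) (h : w ≤ c) :
    pvVal (pvRowT w p row) c = pvVal row c := by
  induction w with
  | zero => rfl
  | succ k ih =>
      rw [pvRowT_succ]
      have hk : k ≠ c := by omega
      split
      · exact ih (by omega)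
      · rw [pvVal_set_ne _ _ _ _ hk]; exact ih (by omega)

-- pvPM lemmas
theorem pvPM_nil (c : Nat) : pvPM [] c = -1 := rfl

theorem pvPM_append_singleton (l : List (List Int)) (r : List Int) (c : Nat) :
    pvPM (l ++ [r]) c = pvStepMax (pvPM l c) (pvVal r c) := by
  simp [pvPM]

theorem pvPM_take_succ (m : List (List Int)) (n : Nat) (c : Nat) (h : n < m.length) :
    pvPM (m.take (n+1)) c = pvStepMax (pvPM (m.take n) c) (pvVal m[n] c) := by
  rw [List.take_succ_eq_append_getElem h, pvPM_append_singleton]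

theorem pvPM_mapIdx_of_val_eq (l : List (List Int)) (g : Nat → List Int → List Int) (c : Nat)
    (h : ∀ i r, pvVal (g i r) c = pvVal r c) : pvPM (l.mapIdx g) c = pvPM l c := by
  unfold pvPM
  rw [pvMap_mapIdx]
  have : (l.mapIdx fun i a => pvVal (g i a) c) = l.mapIdx (fun _ a => pvVal a c) := by
    apply pvMapIdx_congr; intro i hi; rw [h]
  rw [this, pvMapIdx_eq_map]

def pvStepA (c : Nat) (st : List (List Int) × Int) (i : Nat) : List (List Int) × Int :=
  if pvVal (st.1.getD i []) c > st.2 then (st.1, pvVal (st.1.getD i []) c)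
  else (st.1.set i ((st.1.getD i []).set c (-1)), st.2)

def pvCell (c : Nat) (p : Int) (row : List Int) : List Int :=
  if pvVal row c > p then row else row.set c (-1)

theorem pvInnerA_spec (c : Nat) (m : List (List Int)) (n : Nat) (hn : n ≤ m.length) :
    (List.range n).foldl (pvStepA c) (m, -1)
      = (m.mapIdx (fun i row => if i < n then pvCell c (pvPM (m.take i) c) row else row),
         pvPM (m.take n) c) := by
  induction n with
  | zero =>
      simp only [List.range_zero, List.foldl_nil, List.take_zero, pvPM_nil]
      rw [show (fun (i : Nat) (row : List Int) => if i < 0 then pvCell c (pvPM (m.take i) c) row else row)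
            = fun _ row => row by funext i row; simp]
      rw [pvMapIdx_id]
  | succ n ih =>
      have hn' : n < m.length := by omega
      rw [List.range_succ, List.foldl_append, ih (by omega), List.foldl_cons, List.foldl_nil]
      have hget : (m.mapIdx (fun i row => if i < n then pvCell c (pvPM (m.take i) c) row else row)).getD n []
          = m[n] := by
        rw [pvGetD_mapIdx _ _ _ _ hn']; simp
      rw [pvStepA, hget, pvPM_take_succ m n c hn']
      by_cases hcond : pvVal m[n] c > pvPM (m.take n) c
      · rw [if_pos (by simpa using hcond)]
        simp only [Prod.mk.injEq]
        refine ⟨?_, ?_⟩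
        · apply pvMapIdx_congr
          intro i hi
          rcases Nat.lt_trichotomy i n with h | h | h
          · simp [h, Nat.lt_succ_of_lt h]
          · subst h
            simp [pvCell, hcond]
          · simp [show ¬ i < n by omega, show ¬ i < n + 1 by omega]
        · rw [pvStepMax, if_pos hcond]
      · rw [if_neg (by simpa using hcond)]
        simp only [Prod.mk.injEq]
        refine ⟨?_, ?_⟩
        · rw [pvSet_mapIdx]
          apply pvMapIdx_congr
          intro i hi
          rcases Nat.lt_trichotomy i n with h | h | h
          · simp [h, Nat.lt_succ_of_lt h, show i ≠ n by omega]
          · subst h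
            simp [pvCell, hcond]
          · simp [show i ≠ n by omega, show ¬ i < n by omega, show ¬ i < n + 1 by omega]
        · rw [pvStepMax, if_neg hcond]

theorem pvOuterA_spec (m : List (List Int)) (k : Nat) :
    (List.range k).foldl
        (fun mm c => ((List.range m.length).foldl (pvStepA c) (mm, -1)).1) m
      = m.mapIdx (fun i row => pvRowT k (fun c => pvPM (m.take i) c) row) := by
  induction k with
  | zero =>
      rw [List.range_zero, List.foldl_nil,
        show (fun (i : Nat) (row : List Int) => pvRowT 0 (fun c => pvPM (m.take i) c) row)
          = fun _ row => row by funext i row; rfl, pvMapIdx_id]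
  | succ k ih =>
      rw [List.range_succ, List.foldl_append, ih, List.foldl_cons, List.foldl_nil]
      set M := m.mapIdx (fun i row => pvRowT k (fun c => pvPM (m.take i) c) row) with hM
      have hlen : M.length = m.length := by rw [hM, List.length_mapIdx]
      have hval : ∀ i r, pvVal (pvRowT k (fun c => pvPM (m.take i) c) r) k = pvVal r k :=
        fun i r => pvRowT_val_of_le k _ r k (le_refl k)
      have hspec := pvInnerA_spec k M M.length (le_refl _)
      rw [hlen] at hspec
      rw [hspec, hM, pvMapIdx_mapIdx]
      apply pvMapIdx_congr
      intro i hi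
      have hPM : pvPM ((m.mapIdx fun i row => pvRowT k (fun c => pvPM (m.take i) c) row).take i) k
          = pvPM (m.take i) k := by
        rw [pvTake_mapIdx, pvPM_mapIdx_of_val_eq]
        intro j r; exact hval j r
      rw [if_pos (by simpa [hM] using hi), pvCell, hPM, hval, pvRowT_succ]

def pvMid (m : List (List Int)) : List (List Int) :=
  m.mapIdx (fun i row => pvRowT (m.headD []).length (fun c => pvPM (m.take i) c) row)

theorem pv_A_eq_mid (m : List (List Int)) : scanToInstertMinusOneUpToDown m = pvMid m := by
  have hbr : scanToInstertMinusOneUpToDown m =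
      (List.range (m.headD []).length).foldl
        (fun mm c => ((List.range m.length).foldl (pvStepA c) (mm, -1)).1) m := by
    unfold scanToInstertMinusOneUpToDown pvStepA pvVal
    simp [PySem.List.pyRange_one, List.foldl_map, PySem.List.pyGetD_natCast, PySem.List.pySetD_natCast]
    rcases m with _ | ⟨r, rs⟩ <;> simp [PySem.List.pyGetD_zero]
  rw [hbr, pvOuterA_spec, pvMid]

-- ===== B-side lemmas =====

-- max of a list with floor -1 appended = foldl max (-1)
theorem pvFoldlMax_comm (t : List Int) : ∀ a b : Int,
    t.foldl max (max a b) = max a (t.foldl max b) := by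
  induction t with
  | nil => intro a b; rfl
  | cons x t ih =>
      intro a b
      rw [List.foldl_cons, List.foldl_cons, max_assoc, ih]

theorem pvMaxFloor (l : List Int) :
    (PySem.List.max? (l ++ [-1]) (fun y => y)).getD 0 = l.foldl max (-1) := by
  cases l with
  | nil => rfl
  | cons x t =>
      rw [List.cons_append, PySem.List.max?_id_cons, Option.getD_some,
        List.foldl_append, List.foldl_cons, List.foldl_nil, List.foldl_cons,
        max_comm (List.foldl max x t) (-1), ← pvFoldlMax_comm, max_comm (-1 : Int) x]

theorem pvStepMax_eq_max : pvStepMax = fun a v => max a v := by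
  funext a v
  simp only [pvStepMax, max_def]
  split_ifs <;> omega

theorem pvPM_eq_foldl_max (m : List (List Int)) (i : Nat) (c : Nat) (hi : i ≤ m.length) :
    ((List.range i).map (fun j => pvVal (m.getD j []) c)).foldl max (-1) = pvPM (m.take i) c := by
  have hlist : (List.range i).map (fun j => pvVal (m.getD j []) c)
      = (m.take i).map (fun r => pvVal r c) := by
    apply List.ext_getElem (by simp; omega)
    intro k h1 h2
    have hk : k < i := by simpa using h1
    have hkm : k < m.length := by omega
    simp [List.getElem_take, List.getD_eq_getElem?_getD, hkm]
  rw [hlist, pvPM, pvStepMax_eq_max]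

-- fold over flatMap = nested fold
theorem pvFoldl_flatMap {α β γ : Type} (l : List α) (g : α → List β) (f : γ → β → γ) :
    ∀ (init : γ), (l.flatMap g).foldl f init = l.foldl (fun acc a => (g a).foldl f acc) init := by
  induction l with
  | nil => intro init; rfl
  | cons a l ih =>
      intro init
      rw [List.flatMap_cons, List.foldl_append, List.foldl_cons, ih]

-- filterMap of a guarded some over a map = filter-then-map
theorem pvFilterMap_guard {α β γ : Type} (l : List α) (f : α → β) (q : β → Prop)
    [DecidablePred q] (g : β → γ) :
    (l.map f).filterMap (fun x => if q x then some (g x) else none)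
      = (l.filter (fun a => decide (q (f a)))).map (fun a => g (f a)) := by
  induction l with
  | nil => rfl
  | cons a l ih =>
      simp only [List.map_cons, List.filterMap_cons, List.filter_cons]
      by_cases h : q (f a) <;> simp [h, ih]

-- folding the in-place writes of one row-group (out-of-range i: every write is a no-op)
theorem pvGroupFold (cols : List Nat) : ∀ (M : List (List Int)) (i : Nat),
    (cols.map (fun (c : Nat) => ((i : Int), (c : Int)))).foldl
        (fun m p => PySem.List.pySetD m p.1 (PySem.List.pySetD (PySem.List.pyGetD m p.1 []) p.2 (-1))) M
      = M.set i (cols.foldl (fun r c => r.set c (-1)) (M.getD i [])) := by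
  induction cols with
  | nil =>
      intro M i
      simp only [List.map_nil, List.foldl_nil]
      by_cases hi : i < M.length
      · simp [List.getD_eq_getElem?_getD, hi, List.set_getElem_self]
      · rw [List.set_eq_of_length_le (by omega : M.length ≤ i)]
  | cons c cols ih =>
      intro M i
      rw [List.map_cons, List.foldl_cons]
      have hstep : (PySem.List.pySetD M (i : Int)
          (PySem.List.pySetD (PySem.List.pyGetD M (i : Int) []) (c : Int) (-1)))
          = M.set i ((M.getD i []).set c (-1)) := by
        simp
      rw [hstep, ih _ i, List.set_set]
      have hget : (M.set i ((M.getD i []).set c (-1))).getD i []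
          = (M.getD i []).set c (-1) := by
        by_cases hi : i < M.length
        · simp [List.getD_eq_getElem?_getD, hi]
        · rw [List.set_eq_of_length_le (by omega : M.length ≤ i)]
          simp only [List.getD_eq_getElem?_getD,
            List.getElem?_eq_none (by omega : M.length ≤ i)]
          simp
      rw [hget, List.foldl_cons]

-- filter-then-set fold = pvRowT
theorem pvFilterFold (w : Nat) (p : Nat → Int) (row : List Int) :
    ((List.range w).filter (fun c => decide (pvVal row c ≤ p c))).foldl
        (fun r c => r.set c (-1)) row
      = pvRowT w p row := by
  induction w with
  | zero => rfl
  | succ k ih =>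
      rw [List.range_succ, List.filter_append, List.foldl_append, ih, pvRowT_succ]
      by_cases h : pvVal row k ≤ p k
      · rw [if_neg (by omega)]
        simp [h]
      · rw [if_pos (by omega)]
        simp [h]

def pvStepG (m : List (List Int)) (w : Nat) (M : List (List Int)) (i : Nat) : List (List Int) :=
  M.set i (((List.range w).filter
      (fun c => decide (pvVal (m.getD i []) c ≤ pvPM (m.take i) c))).foldl
    (fun r c => r.set c (-1)) (M.getD i []))

theorem pvOuterB_spec (m : List (List Int)) (w : Nat) (n : Nat) (hn : n ≤ m.length) :
    (List.range n).foldl (pvStepG m w) m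
      = m.mapIdx (fun i row => if i < n then pvRowT w (fun c => pvPM (m.take i) c) row else row) := by
  induction n with
  | zero =>
      simp only [List.range_zero, List.foldl_nil]
      rw [show (fun (i : Nat) (row : List Int) =>
            if i < 0 then pvRowT w (fun c => pvPM (m.take i) c) row else row) = fun _ row => row
          by funext i row; simp]
      rw [pvMapIdx_id]
  | succ n ih =>
      have hn' : n < m.length := by omega
      rw [List.range_succ, List.foldl_append, ih (by omega), List.foldl_cons, List.foldl_nil]
      rw [pvStepG]
      have hget : (m.mapIdx (fun i row =>
            if i < n then pvRowT w (fun c => pvPM (m.take i) c) row else row)).getD n [] = m[n] := by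
        rw [pvGetD_mapIdx _ _ _ _ hn']; simp
      have hgetm : m.getD n [] = m[n] := by
        simp [List.getD_eq_getElem?_getD, hn']
      rw [hget, hgetm, pvFilterFold w _ m[n], pvSet_mapIdx]
      apply pvMapIdx_congr
      intro i hi
      rcases Nat.lt_trichotomy i n with h | h | h
      · simp [h, Nat.lt_succ_of_lt h, show i ≠ n by omega]
      · subst h
        simp
      · simp [show i ≠ n by omega, show ¬ i < n by omega, show ¬ i < n + 1 by omega]

-- per-row-group step of B's mutation fold, evaluated against the original matrix
theorem pvPerRow (m M : List (List Int)) (a : Nat) (ha : a < m.length) :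
    List.foldl (fun m p => PySem.List.pySetD m p.1
        (PySem.List.pySetD (PySem.List.pyGetD m p.1 []) p.2 (-1))) M
      (List.filterMap
        (fun x =>
          if PySem.List.pyGetD (PySem.List.pyGetD m (a : Int) []) x 0 ≤
              (PySem.List.max?
                    (List.map (fun j => PySem.List.pyGetD (PySem.List.pyGetD m j []) x 0)
                        (List.map (fun k : Nat => (k : Int)) (List.range a)) ++ [-1])
                    fun y => y).getD 0
          then some ((a : Int), x) else none)
        (List.map (fun k : Nat => (k : Int)) (List.range (m.headD []).length)))
      = pvStepG m (m.headD []).length M a := by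
  simp only [pvFilterMap_guard]
  rw [List.filter_congr (l := List.range (m.headD []).length)
      (q := fun c : Nat => decide (pvVal (m.getD a []) c ≤ pvPM (m.take a) c)) ?_]
  · rw [pvGroupFold, pvStepG]
  · intro c _
    have hmax : (List.map (fun j => PySem.List.pyGetD (PySem.List.pyGetD m j []) ((c : Nat) : Int) 0)
            (List.map (fun k : Nat => (k : Int)) (List.range a)))
        = (List.range a).map (fun j => pvVal (m.getD j []) c) := by
      simp [List.map_map, Function.comp_def, pvVal]
    simp only [hmax, pvMaxFloor, pvPM_eq_foldl_max m a c (le_of_lt ha)]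
    simp [pvVal]

theorem pv_B_eq_mid (m : List (List Int)) : scanToInstertMinusOneUpToDown_alt m = pvMid m := by
  have hw0 : (PySem.List.pyGetD m 0 []) = m.headD [] := by
    rcases m with _ | ⟨r, rs⟩ <;> simp [PySem.List.pyGetD_zero]
  -- step 1: bridge the port to a Nat-level nested fold over row groups
  have hbr : scanToInstertMinusOneUpToDown_alt m
      = (List.range m.length).foldl (pvStepG m (m.headD []).length) m := by
    unfold scanToInstertMinusOneUpToDown_alt
    rw [hw0]
    simp only [PySem.List.pyRange_one, Int.sub_zero, Int.toNat_natCast, List.flatMap_map,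
      zero_add]
    rw [pvFoldl_flatMap]
    apply PySem.List.foldl_congr_mem
    intro M a hmem
    exact pvPerRow m M a (List.mem_range.mp hmem)
  -- step 2: evaluate the Nat-level fold
  rw [hbr, pvOuterB_spec m (m.headD []).length m.length (le_refl _), pvMid]
  apply pvMapIdx_congr
  intro i hi
  rw [if_pos hi]

-- ===== VERDICT (by name: the statement is the Claim_ definition above) =====
theorem scanToInstertMinusOneUpToDown_spec : Claim_equal_scanToInstertMinusOneUpToDown := by
  intro m _ _
  unfold Spec_scanToInstertMinusOneUpToDown
  rw [pv_A_eq_mid, pv_B_eq_mid]
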